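-- pv_equiv track=rewrite | github.com/Atum555/College | FP/MT3 Treino/exercise1.py | days_until_christmas
-- ===== SOURCE A (Python) =====
-- def days_until_christmas(date):
--     d = date[0]
--     m = date[1]
--
--     days_of_month = {
--     1: 31,
--     2: 28,
--     3: 31,
--     4: 30,
--     5: 31,
--     6: 30,
--     7: 31,
--     8: 31,
--     9: 30,
--     10: 31,
--     11: 30,
--     12: 31
--     }
--
--
--     if m == 12 and d > 25:
--         return 31-d + 359
--     if m == 12:
--         return 25-d
--
--     days = days_of_month[m]-d
--     m+=1
--     while m != 12:
--         days += days_of_month[m]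
--         m += 1
--     days += 25
--     return days
-- ===== SOURCE B (Python) =====
-- def days_until_christmas(date):
--     d = date[0]
--     m = date[1]
--     # cumulative days before each month (Jan=0 ... Dec=334); invalid month -> KeyError like A
--     cum = {1: 0, 2: 31, 3: 59, 4: 90, 5: 120, 6: 151,
--            7: 181, 8: 212, 9: 243, 10: 273, 11: 304, 12: 334}
--     r = 359 - (cum[m] + d)  # 359 = day-of-year of Dec 25
--     if m == 12 and r < 0:   # a December date after Christmas wraps to next year
--         r += 365
--     return r
-- ===== Notes on version B (the rewrite author's own statement) =====
-- stated objective: simpler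
-- what changed: Replaces A's month-by-month accumulation loop and its two December branches with one subtraction of day-of-year offsets against Dec 25 (=359) from a precomputed cumulative-days dict, plus a +365 wrap for December dates past Christmas.
import Mathlib
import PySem

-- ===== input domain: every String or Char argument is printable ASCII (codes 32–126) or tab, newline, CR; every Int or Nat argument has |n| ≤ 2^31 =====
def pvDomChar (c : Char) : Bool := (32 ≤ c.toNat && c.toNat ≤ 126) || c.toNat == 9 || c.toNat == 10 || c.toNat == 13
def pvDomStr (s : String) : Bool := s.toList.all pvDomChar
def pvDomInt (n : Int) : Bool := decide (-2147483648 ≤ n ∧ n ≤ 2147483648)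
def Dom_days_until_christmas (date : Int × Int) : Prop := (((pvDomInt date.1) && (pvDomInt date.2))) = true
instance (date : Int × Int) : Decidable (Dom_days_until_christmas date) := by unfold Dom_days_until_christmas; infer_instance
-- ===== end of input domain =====

-- B replaces A's month-accumulation loop with one day-of-year subtraction from a
-- cumulative-days dict (objective: simpler).

-- ===== PORT A =====
-- A's days_of_month dict (KeyError for m outside 1..12 is excluded by Pre_; getD's
-- default is never reached inside Pre_).
def pvDaysOfMonth : PySem.Dict Int Int :=
  PySem.Dict.ofList [(1, 31), (2, 28), (3, 31), (4, 30), (5, 31), (6, 30),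
                     (7, 31), (8, 31), (9, 30), (10, 31), (11, 30), (12, 31)]

-- the 'while m != 12' accumulation loop; fuel only makes it total (Pre_ gives m ≤ 12)
def pvLoopA (fuel : Nat) (m days : Int) : Int :=
  match fuel with
  | 0 => days
  | f + 1 => if m ≠ 12 then pvLoopA f (m + 1) (days + pvDaysOfMonth.getD m 0) else days

def days_until_christmas (date : Int × Int) : Int :=
  let d := date.1
  let m := date.2
  if m = 12 ∧ d > 25 then 31 - d + 359
  else if m = 12 then 25 - d
  else
    let days := pvDaysOfMonth.getD m 0 - d
    pvLoopA (12 - (m + 1)).toNat (m + 1) days + 25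

-- ===== PORT B =====
-- cumulative days before each month (Jan=0 ... Dec=334)
def pvCum : PySem.Dict Int Int :=
  PySem.Dict.ofList [(1, 0), (2, 31), (3, 59), (4, 90), (5, 120), (6, 151),
                     (7, 181), (8, 212), (9, 243), (10, 273), (11, 304), (12, 334)]

def days_until_christmas_alt (date : Int × Int) : Int :=
  let d := date.1
  let m := date.2
  let r := 359 - (pvCum.getD m 0 + d)
  if m = 12 ∧ r < 0 then r + 365 else r

-- ===== PRECONDITION & SPEC =====
-- Pre_ excludes months outside 1..12, on which both Pythons raise KeyError.
def Pre_days_until_christmas (date : Int × Int) : Prop := 1 ≤ date.2 ∧ date.2 ≤ 12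
instance (date : Int × Int) : Decidable (Pre_days_until_christmas date) := by
  unfold Pre_days_until_christmas; infer_instance
def pvWitness_days_until_christmas : (Int × Int) := (7, 4)

def Spec_days_until_christmas (date : Int × Int) (out : Int) : Prop := out = days_until_christmas_alt date
instance (date : Int × Int) (out : Int) : Decidable (Spec_days_until_christmas date out) := by unfold Spec_days_until_christmas; infer_instance

-- ===== CLAIM (what is proved, stated in full; the proofs are below) =====
def Claim_equal_days_until_christmas : Prop := ∀ (date : Int × Int), Dom_days_until_christmas date → Pre_days_until_christmas date → Spec_days_until_christmas date (days_until_christmas date)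

-- ===== LEMMAS AND PROOFS =====

-- ===== VERDICT (by name: the statement is the Claim_ definition above) =====
lemma pvLoopA_add (f : Nat) (m days : Int) : pvLoopA f m days = days + pvLoopA f m 0 := by
  induction f generalizing m days with
  | zero => simp [pvLoopA]
  | succ f ih =>
    simp only [pvLoopA]
    split_ifs
    · rw [ih (m + 1) (days + pvDaysOfMonth.getD m 0), ih (m + 1) (0 + pvDaysOfMonth.getD m 0)]
      ring
    · simp

lemma pvE10 : pvLoopA (Int.toNat 10) 2 0 = 303 := by decide
lemma pvE9 : pvLoopA (Int.toNat 9) 3 0 = 275 := by decide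
lemma pvE8 : pvLoopA (Int.toNat 8) 4 0 = 244 := by decide
lemma pvE7 : pvLoopA (Int.toNat 7) 5 0 = 214 := by decide
lemma pvE6 : pvLoopA (Int.toNat 6) 6 0 = 183 := by decide
lemma pvE5 : pvLoopA (Int.toNat 5) 7 0 = 153 := by decide
lemma pvE4 : pvLoopA (Int.toNat 4) 8 0 = 122 := by decide
lemma pvE3 : pvLoopA (Int.toNat 3) 9 0 = 91 := by decide
lemma pvE2 : pvLoopA (Int.toNat 2) 10 0 = 61 := by decide
lemma pvE1' : pvLoopA 1 11 0 = 30 := by decide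
lemma pvE0 : pvLoopA 0 12 0 = 0 := by decide

theorem days_until_christmas_spec : Claim_equal_days_until_christmas := by
  rintro ⟨d, m⟩ _ ⟨h1, h2⟩
  show days_until_christmas (d, m) = days_until_christmas_alt (d, m)
  interval_cases m <;>
    simp only [days_until_christmas, days_until_christmas_alt,
          pvDaysOfMonth, pvCum, PySem.Dict.ofList, PySem.Dict.getD,
          PySem.Dict.get?, PySem.Dict.empty, PySem.Dict.update, PySem.Dict.insert,
          PySem.Dict.items, List.find?] <;>
    norm_num <;>
    (try rw [pvLoopA_add, pvE10]) <;> (try rw [pvLoopA_add, pvE9]) <;>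
    (try rw [pvLoopA_add, pvE8]) <;> (try rw [pvLoopA_add, pvE7]) <;>
    (try rw [pvLoopA_add, pvE6]) <;> (try rw [pvLoopA_add, pvE5]) <;>
    (try rw [pvLoopA_add, pvE4]) <;> (try rw [pvLoopA_add, pvE3]) <;>
    (try rw [pvLoopA_add, pvE2]) <;> (try rw [pvLoopA_add, pvE1']) <;> (try rw [pvLoopA_add, pvE0]) <;>
    (try split_ifs) <;> omega
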